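-- pv_equiv track=rewrite | github.com/MichaelRWolf/wolf-soho | Atlassian/linkedin_comment_parse_stdin_v2.py | collapse_blank_runs
-- ===== SOURCE A (Python) =====
-- from typing import List, Dict, Optional
--
-- def collapse_blank_runs(lines: List[str]) -> List[str]:
--     out: List[str] = []
--     blank = False
--     for l in lines:
--         if l.strip() == "":
--             if not blank:
--                 out.append("")
--             blank = True
--         else:
--             out.append(l)
--             blank = False
--     return out
-- ===== SOURCE B (Python) =====
-- from itertools import groupby
-- from typing import List
--
--
-- def collapse_blank_runs(lines: List[str]) -> List[str]:
--     out: List[str] = []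
--     for is_blank, grp in groupby(lines, key=lambda l: l.strip() == ""):
--         if is_blank:
--             out.append("")
--         else:
--             out.extend(grp)
--     return out
-- ===== Notes on version B (the rewrite author's own statement) =====
-- stated objective: idiomatic
-- what changed: Replaces the per-line blank flag with itertools.groupby over maximal runs of equal blankness: each blank run contributes a single '' and each non-blank run is extended wholesale.
import Mathlib
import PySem

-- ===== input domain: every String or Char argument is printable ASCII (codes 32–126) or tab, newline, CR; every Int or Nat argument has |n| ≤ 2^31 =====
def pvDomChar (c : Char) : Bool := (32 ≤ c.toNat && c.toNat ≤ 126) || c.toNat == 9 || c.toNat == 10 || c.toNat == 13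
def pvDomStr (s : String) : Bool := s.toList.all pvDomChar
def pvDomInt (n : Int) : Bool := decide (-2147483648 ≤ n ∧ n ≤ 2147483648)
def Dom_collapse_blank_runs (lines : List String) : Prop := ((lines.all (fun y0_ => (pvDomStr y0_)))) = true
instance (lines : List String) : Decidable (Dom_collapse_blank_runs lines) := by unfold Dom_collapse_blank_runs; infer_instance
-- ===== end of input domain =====

-- B collapses blank runs by grouping maximal runs of equal blankness (itertools.groupby style) instead of A's per-line blank flag; objective: idiomatic.


-- l.strip() == ""
def pvBlank (l : String) : Bool := PySem.Str.strip l == ""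

-- ===== PORT A =====
-- fold over the lines carrying (out, blank), exactly A's loop
def collapse_blank_runs (lines : List String) : List String :=
  (lines.foldl
    (fun (st : List String × Bool) l =>
      if pvBlank l then
        ((if !st.2 then st.1 ++ [""] else st.1), true)
      else
        (st.1 ++ [l], false))
    ([], false)).1

-- ===== PORT B =====
-- groupby over maximal runs: a blank run yields one "", a non-blank run is kept whole
def collapse_blank_runs_alt (lines : List String) : List String :=
  match lines with
  | [] => []
  | l :: rest =>
    if pvBlank l then
      "" :: collapse_blank_runs_alt (rest.dropWhile pvBlank)
    else
      (l :: rest.takeWhile (fun x => !pvBlank x)) ++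
        collapse_blank_runs_alt (rest.dropWhile (fun x => !pvBlank x))
  termination_by lines.length
  decreasing_by
  · exact Nat.lt_succ_of_le (List.length_dropWhile_le _ _)
  · exact Nat.lt_succ_of_le (List.length_dropWhile_le _ _)

-- ===== PRECONDITION & SPEC =====
def Spec_collapse_blank_runs (lines : List String) (out : List String) : Prop := out = collapse_blank_runs_alt lines
instance (lines : List String) (out : List String) : Decidable (Spec_collapse_blank_runs lines out) := by unfold Spec_collapse_blank_runs; infer_instance

-- ===== CLAIM (what is proved, stated in full; the proofs are below) =====
def Claim_equal_collapse_blank_runs : Prop := ∀ (lines : List String), Dom_collapse_blank_runs lines → Spec_collapse_blank_runs lines (collapse_blank_runs lines)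

-- ===== LEMMAS AND PROOFS =====

-- structural form of A's loop body, without the accumulated output
def pvGoA (b : Bool) : List String → List String
  | [] => []
  | l :: rest =>
    if pvBlank l then (if !b then [""] else []) ++ pvGoA true rest
    else l :: pvGoA false rest

theorem pvFoldA (ls : List String) : ∀ (out : List String) (b : Bool),
    (ls.foldl
      (fun (st : List String × Bool) l =>
        if pvBlank l then
          ((if !st.2 then st.1 ++ [""] else st.1), true)
        else
          (st.1 ++ [l], false))
      (out, b)).1 = out ++ pvGoA b ls := by
  induction ls with
  | nil => intro out b; simp [pvGoA]
  | cons l rest ih =>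
    intro out b
    by_cases h : pvBlank l = true <;> cases b <;>
      simp only [List.foldl_cons, h, Bool.not_true, Bool.not_false, if_true] <;>
      rw [ih] <;> simp [pvGoA, h]

-- stripping a leading maximal non-blank run off B's input just re-emits it
theorem pvAltNB (rest : List String) :
    rest.takeWhile (fun x => !pvBlank x) ++
      collapse_blank_runs_alt (rest.dropWhile (fun x => !pvBlank x)) =
    collapse_blank_runs_alt rest := by
  cases rest with
  | nil => simp [collapse_blank_runs_alt]
  | cons r rs =>
    by_cases h : pvBlank r = true
    · simp [List.takeWhile, List.dropWhile, h]
    · rw [collapse_blank_runs_alt]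
      simp [List.takeWhile, List.dropWhile, h]

theorem pvGoA_alt (ls : List String) :
    pvGoA true ls = collapse_blank_runs_alt (ls.dropWhile pvBlank) ∧
    pvGoA false ls = collapse_blank_runs_alt ls := by
  induction ls with
  | nil => simp [pvGoA, collapse_blank_runs_alt]
  | cons l rest ih =>
    by_cases h : pvBlank l = true
    · constructor
      · simp [pvGoA, h, List.dropWhile, ih.1]
      · rw [collapse_blank_runs_alt]
        simp [pvGoA, h, ih.1]
    · constructor
      · simp [pvGoA, h, List.dropWhile]
        rw [collapse_blank_runs_alt]
        simp [h, ih.2, ← pvAltNB rest]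
      · rw [collapse_blank_runs_alt]
        simp [pvGoA, h, ih.2, ← pvAltNB rest]

-- ===== VERDICT (by name: the statement is the Claim_ definition above) =====
theorem collapse_blank_runs_spec : Claim_equal_collapse_blank_runs := by
  intro lines _
  unfold Spec_collapse_blank_runs collapse_blank_runs
  rw [pvFoldA]
  simp [(pvGoA_alt lines).2]
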